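-- pv_equiv track=rewrite | github.com/thomasnormal/circt | utils/mutation_mcy/lib/native_mutation_plan.py | statement_looks_like_typed_declaration
-- ===== SOURCE A (Python) =====
-- def is_code_span(mask: list[bool], start: int, end: int) -> bool:
--     if start < 0 or end > len(mask) or start >= end:
--         return False
--     return all(mask[i] for i in range(start, end))
--
-- def is_code_at(mask: list[bool], pos: int) -> bool:
--     return 0 <= pos < len(mask) and mask[pos]
--
-- def find_prev_code_nonspace(text: str, mask: list[bool], pos: int) -> int:
--     i = pos
--     while i > 0:
--         i -= 1
--         if not is_code_at(mask, i):
--             continue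
--         if text[i].isspace():
--             continue
--         return i
--     return -1
--
-- def _skip_code_ws(text: str, mask: list[bool], i: int, end: int) -> int:
--     while i < end:
--         if not is_code_at(mask, i):
--             i += 1
--             continue
--         if text[i].isspace():
--             i += 1
--             continue
--         break
--     return i
--
-- def _parse_identifier_token(text: str, mask: list[bool], i: int, end: int) -> tuple[int, int]:
--     if i >= end or not is_code_at(mask, i):
--         return (-1, -1)
--     ch = text[i]
--     if not (ch.isalpha() or ch == "_"):
--         return (-1, -1)
--     start = i
--     i += 1
--     while i < end and is_code_at(mask, i) and (text[i].isalnum() or text[i] in ("_", "$")):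
--         i += 1
--     return (start, i)
--
-- def _skip_balanced(text: str, mask: list[bool], i: int, end: int, open_ch: str, close_ch: str) -> int:
--     if i >= end or not is_code_at(mask, i) or text[i] != open_ch:
--         return i
--     depth = 0
--     while i < end:
--         if not is_code_at(mask, i):
--             i += 1
--             continue
--         ch = text[i]
--         if ch == open_ch:
--             depth += 1
--         elif ch == close_ch:
--             depth -= 1
--             if depth == 0:
--                 return i + 1
--         i += 1
--     return end
--
-- def statement_looks_like_typed_declaration(text: str, mask: list[bool], stmt_start: int, pos: int) -> bool:
--     end = min(pos, len(text))
--     i = _skip_code_ws(text, mask, max(0, stmt_start), end)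
--     first_start, first_end = _parse_identifier_token(text, mask, i, end)
--     if first_start < 0:
--         return False
--     first_token = text[first_start:first_end].lower()
--     if first_token in {"assign", "if", "for", "while", "case", "foreach", "return", "begin", "end"}:
--         return False
--     i = first_end
--
--     while True:
--         i = _skip_code_ws(text, mask, i, end)
--         if i + 1 < end and is_code_span(mask, i, i + 2) and text.startswith("::", i):
--             i = _skip_code_ws(text, mask, i + 2, end)
--             _, i = _parse_identifier_token(text, mask, i, end)
--             if i < 0:
--                 return False
--             continue
--         if i < end and is_code_at(mask, i) and text[i] == "#":
--             i = _skip_code_ws(text, mask, i + 1, end)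
--             i = _skip_balanced(text, mask, i, end, "(", ")")
--             continue
--         if i < end and is_code_at(mask, i) and text[i] == "[":
--             i = _skip_balanced(text, mask, i, end, "[", "]")
--             continue
--         break
--
--     i = _skip_code_ws(text, mask, i, end)
--     second_start, _ = _parse_identifier_token(text, mask, i, end)
--     if second_start < 0:
--         return False
--     prev_sig = find_prev_code_nonspace(text, mask, second_start)
--     if prev_sig >= 0 and text[prev_sig] == ".":
--         return False
--     return True
-- ===== SOURCE B (Python) =====
-- # B: staged re-implementation. One forward state-machine sweep tokenizes the
-- # region into significant tokens; a token-list walk judges the declaration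
-- # shape; the '.'-before-second-identifier test is a forward fold over the prefix.
-- def statement_looks_like_typed_declaration(text, mask, stmt_start, pos):
--     n = len(text)
--     end = min(pos, n)
--     start = max(0, stmt_start)
--     m = len(mask)
--
--     def identch(ch):
--         return ch.isalnum() or ch in "_$"
--
--     # Pass 1: single forward sweep with a run-in-progress state.
--     toks = []   # ("id", start, end, text) | ("p", pos, char)
--     run = None  # start index of the identifier-like run in progress
--     for i in range(start, end):
--         ch = text[i]
--         if 0 <= i < m and mask[i] and not ch.isspace():
--             if identch(ch):
--                 if run is None:
--                     run = i
--             else: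
--                 if run is not None:
--                     toks.append(("id", run, i, text[run:i]))
--                     run = None
--                 toks.append(("p", i, ch))
--         else:
--             if run is not None:
--                 toks.append(("id", run, i, text[run:i]))
--                 run = None
--     if run is not None:
--         toks.append(("id", run, end, text[run:end]))
--
--     def is_ident(t):
--         return t[0] == "id" and (t[3][0].isalpha() or t[3][0] == "_")
--
--     def skip_group(k, open_ch, close_ch):
--         depth = 0
--         while k < len(toks):
--             t = toks[k]
--             if t[0] == "p":
--                 if t[2] == open_ch:
--                     depth += 1
--                 elif t[2] == close_ch:
--                     depth -= 1
--                     if depth == 0: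
--                         return k + 1
--             k += 1
--         return len(toks)
--
--     # Pass 2: walk the token list.
--     if not toks or not is_ident(toks[0]):
--         return False
--     if toks[0][3].lower() in ("assign", "if", "for", "while", "case",
--                               "foreach", "return", "begin", "end"):
--         return False
--     k = 1
--     while k < len(toks):
--         t = toks[k]
--         if (t[0] == "p" and t[2] == ":" and k + 1 < len(toks)
--                 and toks[k + 1][0] == "p" and toks[k + 1][2] == ":"
--                 and toks[k + 1][1] == t[1] + 1):
--             if k + 2 >= len(toks) or not is_ident(toks[k + 2]):
--                 return False
--             k += 3
--             continue
--         if t[0] == "p" and t[2] == "#":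
--             k += 1
--             if k < len(toks) and toks[k][0] == "p" and toks[k][2] == "(":
--                 k = skip_group(k, "(", ")")
--             continue
--         if t[0] == "p" and t[2] == "[":
--             k = skip_group(k, "[", "]")
--             continue
--         break
--     if k >= len(toks) or not is_ident(toks[k]):
--         return False
--
--     # Pass 3: forward fold for the last significant character before the token.
--     last = None
--     for j in range(toks[k][1]):
--         if 0 <= j < m and mask[j] and not text[j].isspace():
--             last = text[j]
--     return last != "."
-- ===== Notes on version B (the rewrite author's own statement) =====
-- stated objective: alternative
-- what changed: A walks the text with a single index-based scanner whose helpers re-scan characters from raw positions (skip-whitespace, parse-identifier, skip-balanced, and a backward previous-significant scan); B is three staged passes over different representations: one forward state-machine sweep that tokenizes the region into a list of significant tokens, a walk over that token list deciding the declaration shape, and a forward fold over the prefix for the dot test.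
import Mathlib
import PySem

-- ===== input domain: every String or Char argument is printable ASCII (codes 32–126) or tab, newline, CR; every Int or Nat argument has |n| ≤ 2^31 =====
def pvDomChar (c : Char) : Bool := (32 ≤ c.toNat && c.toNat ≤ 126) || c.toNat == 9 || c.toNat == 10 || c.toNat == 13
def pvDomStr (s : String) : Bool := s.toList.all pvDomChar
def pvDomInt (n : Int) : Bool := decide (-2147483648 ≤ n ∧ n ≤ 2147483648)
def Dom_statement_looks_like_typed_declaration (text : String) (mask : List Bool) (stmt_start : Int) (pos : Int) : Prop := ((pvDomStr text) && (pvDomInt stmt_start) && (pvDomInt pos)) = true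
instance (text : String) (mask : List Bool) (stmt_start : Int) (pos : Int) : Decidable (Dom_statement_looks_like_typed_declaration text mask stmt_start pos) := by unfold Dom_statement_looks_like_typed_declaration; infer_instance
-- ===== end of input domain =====

-- B replaces A's index-walking scanner (whose helpers re-scan the text from raw
-- positions) by three staged passes: one forward state-machine sweep that
-- tokenizes the region, a walk over the token list, and a forward fold for the
-- previous-significant-character test; objective: alternative structure, same
-- exact return value.

-- ===== PORT A =====
-- text[i] as a character read; used only at indices 0 ≤ i < len(text), where it is exact.
def pvCh (cs : List Char) (i : Int) : Char := cs.getD i.toNat ' '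

-- is_code_at
def pvIsCodeAtA (ms : List Bool) (i : Int) : Bool :=
  decide (0 ≤ i) && decide (i < (ms.length : Int)) && ms.getD i.toNat false

-- is_code_span
def pvIsCodeSpanA (ms : List Bool) (s e : Int) : Bool :=
  if s < 0 ∨ (ms.length : Int) < e ∨ e ≤ s then false
  else (PySem.List.pyRange s e 1).all (fun j => ms.getD j.toNat false)

-- find_prev_code_nonspace
def pvFindPrevA (cs : List Char) (ms : List Bool) (i : Int) : Int :=
  if h : 0 < i then
    if ¬ pvIsCodeAtA ms (i - 1) then pvFindPrevA cs ms (i - 1)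
    else if PySem.Chars.isspace (pvCh cs (i - 1)) then pvFindPrevA cs ms (i - 1)
    else i - 1
  else -1
termination_by i.toNat
decreasing_by all_goals omega

-- _skip_code_ws
def pvSkipWsA (cs : List Char) (ms : List Bool) (endI : Int) (i : Int) : Int :=
  if h : i < endI then
    if ¬ pvIsCodeAtA ms i then pvSkipWsA cs ms endI (i + 1)
    else if PySem.Chars.isspace (pvCh cs i) then pvSkipWsA cs ms endI (i + 1)
    else i
  else i
termination_by (endI - i).toNat
decreasing_by all_goals omega

-- the identifier-extension while loop inside _parse_identifier_token
def pvRunEndA (cs : List Char) (ms : List Bool) (endI : Int) (j : Int) : Int :=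
  if h : j < endI then
    if pvIsCodeAtA ms j &&
        (PySem.Chars.isalnum (pvCh cs j) || pvCh cs j == '_' || pvCh cs j == '$') then
      pvRunEndA cs ms endI (j + 1)
    else j
  else j
termination_by (endI - j).toNat
decreasing_by all_goals omega

-- _parse_identifier_token
def pvParseIdA (cs : List Char) (ms : List Bool) (endI : Int) (i : Int) : Int × Int :=
  if endI ≤ i then (-1, -1)
  else if ¬ pvIsCodeAtA ms i then (-1, -1)
  else if ¬ (PySem.Chars.isalpha (pvCh cs i) || pvCh cs i == '_') then (-1, -1)
  else (i, pvRunEndA cs ms endI (i + 1))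

-- the while loop of _skip_balanced
def pvBalLoopA (cs : List Char) (ms : List Bool) (endI : Int) (oc cc : Char) (i depth : Int) : Int :=
  if h : i < endI then
    if ¬ pvIsCodeAtA ms i then pvBalLoopA cs ms endI oc cc (i + 1) depth
    else if pvCh cs i == oc then pvBalLoopA cs ms endI oc cc (i + 1) (depth + 1)
    else if pvCh cs i == cc then
      if depth - 1 = 0 then i + 1 else pvBalLoopA cs ms endI oc cc (i + 1) (depth - 1)
    else pvBalLoopA cs ms endI oc cc (i + 1) depth
  else endI
termination_by (endI - i).toNat
decreasing_by all_goals omega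

-- _skip_balanced
def pvSkipBalA (cs : List Char) (ms : List Bool) (endI : Int) (oc cc : Char) (i : Int) : Int :=
  if endI ≤ i ∨ ¬ pvIsCodeAtA ms i ∨ ¬ (pvCh cs i == oc) then i
  else pvBalLoopA cs ms endI oc cc i 0

def pvKwA : List (List Char) :=
  [['a','s','s','i','g','n'], ['i','f'], ['f','o','r'], ['w','h','i','l','e'],
   ['c','a','s','e'], ['f','o','r','e','a','c','h'], ['r','e','t','u','r','n'],
   ['b','e','g','i','n'], ['e','n','d']]

-- the `while True` loop; none = `return False` inside the loop, some i = break with i.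
-- (fuel is always sufficient: i strictly increases and is bounded by endI ≤ len(text);
-- text.startswith("::", i) is ported as the two character reads, exact since i+1 < end ≤ len.)
def pvLoopA (cs : List Char) (ms : List Bool) (endI : Int) : Nat → Int → Option Int
  | 0, i => some i
  | fuel + 1, i =>
    let j := pvSkipWsA cs ms endI i
    if decide (j + 1 < endI) && pvIsCodeSpanA ms j (j + 2) &&
        (pvCh cs j == ':') && (pvCh cs (j + 1) == ':') then
      let r := pvParseIdA cs ms endI (pvSkipWsA cs ms endI (j + 2))
      if r.2 < 0 then none else pvLoopA cs ms endI fuel r.2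
    else if decide (j < endI) && pvIsCodeAtA ms j && (pvCh cs j == '#') then
      pvLoopA cs ms endI fuel (pvSkipBalA cs ms endI '(' ')' (pvSkipWsA cs ms endI (j + 1)))
    else if decide (j < endI) && pvIsCodeAtA ms j && (pvCh cs j == '[') then
      pvLoopA cs ms endI fuel (pvSkipBalA cs ms endI '[' ']' j)
    else some j

def statement_looks_like_typed_declaration (text : String) (mask : List Bool) (stmt_start : Int) (pos : Int) : Bool :=
  let cs := text.toList
  let endI := min pos (cs.length : Int)
  let f := pvParseIdA cs mask endI (pvSkipWsA cs mask endI (max 0 stmt_start))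
  if f.1 < 0 then false
  else if pvKwA.contains (PySem.Chars.lower (PySem.List.slice cs (some f.1) (some f.2))) then false
  else
    match pvLoopA cs mask endI (cs.length + 1) f.2 with
    | none => false
    | some i1 =>
      let s := pvParseIdA cs mask endI (pvSkipWsA cs mask endI i1)
      if s.1 < 0 then false
      else
        let prev := pvFindPrevA cs mask s.1
        if decide (0 ≤ prev) && (pvCh cs prev == '.') then false else true

-- ===== PORT B =====
-- code()
def pvCodeB (ms : List Bool) (i : Int) : Bool :=
  decide (0 ≤ i) && decide (i < (ms.length : Int)) && ms.getD i.toNat false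

-- identch(): ch.isalnum() or ch in "_$"
def pvIdentCharB (c : Char) : Bool :=
  PySem.Chars.isalnum c || c == '_' || c == '$'

inductive PvTok : Type
  | id : Int → Int → List Char → PvTok
  | p : Int → Char → PvTok
deriving DecidableEq, Repr

def pvTokPos : PvTok → Int
  | .id s _ _ => s
  | .p s _ => s

-- t[3]; only read on "id" tokens (whose stored text is never empty)
def pvTokStr : PvTok → List Char
  | .id _ _ str => str
  | .p _ c => [c]

-- Pass 1: the body of the tokenizing sweep; state = (tokens so far, run start in progress)
def pvTokStep (cs : List Char) (ms : List Bool) (st : List PvTok × Option Int) (i : Int) :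
    List PvTok × Option Int :=
  let ch := pvCh cs i
  if pvCodeB ms i && !PySem.Chars.isspace ch then
    if pvIdentCharB ch then
      match st.2 with
      | none => (st.1, some i)
      | some _ => st
    else
      match st.2 with
      | some r =>
        ((st.1 ++ [PvTok.id r i (PySem.List.slice cs (some r) (some i))]) ++ [PvTok.p i ch], none)
      | none => (st.1 ++ [PvTok.p i ch], none)
  else
    match st.2 with
    | some r => (st.1 ++ [PvTok.id r i (PySem.List.slice cs (some r) (some i))], none)
    | none => st

-- the whole sweep: fold the loop body over range(start, end), then the final flush
def pvTokensB (cs : List Char) (ms : List Bool) (start endI : Int) : List PvTok :=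
  match (PySem.List.pyRange start endI 1).foldl (pvTokStep cs ms) ([], none) with
  | (acc, some r) => acc ++ [PvTok.id r endI (PySem.List.slice cs (some r) (some endI))]
  | (acc, none) => acc

-- is_ident
def pvIsIdentB : PvTok → Bool
  | .id _ _ (c :: _) => PySem.Chars.isalpha c || c == '_'
  | _ => false

-- skip_group, on the remaining token suffix
def pvSkipGroupB (oc cc : Char) : List PvTok → Int → List PvTok
  | [], _ => []
  | .p _ ch :: rest, depth =>
    if ch == oc then pvSkipGroupB oc cc rest (depth + 1)
    else if ch == cc then
      if depth - 1 = 0 then rest else pvSkipGroupB oc cc rest (depth - 1)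
    else pvSkipGroupB oc cc rest depth
  | .id _ _ _ :: rest, depth => pvSkipGroupB oc cc rest depth

-- Pass 2: the token walk; none = `return False`, some ts = break with suffix ts.
-- (fuel is always sufficient: each iteration consumes at least one token.)
def pvWalkB : Nat → List PvTok → Option (List PvTok)
  | 0, ts => some ts
  | _ + 1, [] => some []
  | fuel + 1, t :: rest =>
    match t with
    | .p p1 c1 =>
      if c1 == ':' then
        match rest with
        | .p p2 c2 :: rest2 =>
          if c2 == ':' && p2 == p1 + 1 then
            match rest2 with
            | t3 :: rest3 => if pvIsIdentB t3 then pvWalkB fuel rest3 else none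
            | [] => none
          else some (t :: rest)
        | _ => some (t :: rest)
      else if c1 == '#' then
        match rest with
        | .p _ '(' :: _ => pvWalkB fuel (pvSkipGroupB '(' ')' rest 0)
        | _ => pvWalkB fuel rest
      else if c1 == '[' then
        pvWalkB fuel (pvSkipGroupB '[' ']' (t :: rest) 0)
      else some (t :: rest)
    | .id _ _ _ => some (t :: rest)

-- Pass 3: forward fold keeping the last significant character of text[:p]
def pvLastSigB (cs : List Char) (ms : List Bool) (p : Int) : Option Char :=
  (PySem.List.pyRange 0 p 1).foldl
    (fun last j =>
      if pvCodeB ms j && !PySem.Chars.isspace (pvCh cs j) then some (pvCh cs j) else last)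
    none

def statement_looks_like_typed_declaration_alt (text : String) (mask : List Bool) (stmt_start : Int) (pos : Int) : Bool :=
  let cs := text.toList
  let endI := min pos (cs.length : Int)
  let toks := pvTokensB cs mask (max 0 stmt_start) endI
  match toks with
  | [] => false
  | t0 :: rest =>
    if ¬ pvIsIdentB t0 then false
    else if ((["assign", "if", "for", "while", "case", "foreach", "return", "begin",
        "end"] : List String).map String.toList).contains
          (PySem.Chars.lower (pvTokStr t0)) then false
    else
      match pvWalkB (toks.length + 1) rest with
      | none => false
      | some ts2 =>
        match ts2 with
        | [] => false
        | t :: _ =>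
          if ¬ pvIsIdentB t then false
          else
            match pvLastSigB cs mask (pvTokPos t) with
            | none => true
            | some c => !(c == '.')

-- ===== PRECONDITION & SPEC =====
def Spec_statement_looks_like_typed_declaration (text : String) (mask : List Bool) (stmt_start : Int) (pos : Int) (out : Bool) : Prop := out = statement_looks_like_typed_declaration_alt text mask stmt_start pos
instance (text : String) (mask : List Bool) (stmt_start : Int) (pos : Int) (out : Bool) : Decidable (Spec_statement_looks_like_typed_declaration text mask stmt_start pos out) := by unfold Spec_statement_looks_like_typed_declaration; infer_instance

-- ===== CLAIM (what is proved, stated in full; the proofs are below) =====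
def Claim_equal_statement_looks_like_typed_declaration : Prop := ∀ (text : String) (mask : List Bool) (stmt_start : Int) (pos : Int), Dom_statement_looks_like_typed_declaration text mask stmt_start pos → Spec_statement_looks_like_typed_declaration text mask stmt_start pos (statement_looks_like_typed_declaration text mask stmt_start pos)

-- ===== LEMMAS AND PROOFS =====

-- proof-only helpers: A's character-level scan re-expressed as the recursive
-- tokenizer pvTokenize, the common middle ground between the two ports
def pvRunEndB (cs : List Char) (ms : List Bool) (endI : Int) (j : Int) : Int :=
  if h : j < endI then
    if pvCodeB ms j && pvIdentCharB (pvCh cs j) then pvRunEndB cs ms endI (j + 1)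
    else j
  else j
termination_by (endI - j).toNat
decreasing_by all_goals omega

theorem pvRunEndB_ge (cs : List Char) (ms : List Bool) (endI j : Int) :
    j ≤ pvRunEndB cs ms endI j := by
  fun_induction pvRunEndB cs ms endI j <;> omega

def pvTokenize (cs : List Char) (ms : List Bool) (endI : Int) (i : Int) : List PvTok :=
  if h : i < endI then
    if ¬ pvCodeB ms i then pvTokenize cs ms endI (i + 1)
    else if PySem.Chars.isspace (pvCh cs i) then pvTokenize cs ms endI (i + 1)
    else if pvIdentCharB (pvCh cs i) then
      PvTok.id i (pvRunEndB cs ms endI (i + 1))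
        (PySem.List.slice cs (some i) (some (pvRunEndB cs ms endI (i + 1)))) ::
        pvTokenize cs ms endI (pvRunEndB cs ms endI (i + 1))
    else PvTok.p i (pvCh cs i) :: pvTokenize cs ms endI (i + 1)
  else []
termination_by (endI - i).toNat
decreasing_by
  all_goals first
    | omega
    | (have := pvRunEndB_ge cs ms endI (i + 1); omega)

theorem pv_code_eq (ms : List Bool) (i : Int) : pvIsCodeAtA ms i = pvCodeB ms i := rfl

theorem pv_ne_of_pred {p : Char → Bool} (c x : Char) (h : p c = true) (hx : p x = false) :
    (c == x) = false := by
  simp only [beq_eq_false_iff_ne]; rintro rfl; rw [h] at hx; cases hx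

theorem pv_alpha_ident (c : Char) (h : PySem.Chars.isalpha c = true) : pvIdentCharB c = true := by
  simp [pvIdentCharB, PySem.Chars.isalnum, h]

theorem pv_not_ident (c : Char) (h : pvIdentCharB c = false) :
    PySem.Chars.isalpha c = false ∧ (c == '_') = false := by
  constructor
  · by_contra hc
    rw [pv_alpha_ident c (by revert hc; cases PySem.Chars.isalpha c <;> simp)] at h; cases h
  · simp only [beq_eq_false_iff_ne]; rintro rfl; rw [show pvIdentCharB '_' = true by decide] at h
    cases h

theorem pv_space_not_ident (c : Char) (h : PySem.Chars.isspace c = true) :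
    pvIdentCharB c = false := by
  rw [pvIdentCharB, Bool.eq_false_iff]
  intro hc
  simp only [PySem.Chars.isspace, Bool.or_eq_true, Bool.and_eq_true, decide_eq_true_eq] at h
  simp only [PySem.Chars.isalnum, PySem.Chars.isalpha, PySem.Chars.isdigit, PySem.Chars.isupper,
    PySem.Chars.islower, Bool.or_eq_true, Bool.and_eq_true, decide_eq_true_eq, beq_iff_eq] at hc
  rcases hc with (((⟨h1, h2⟩ | ⟨h1, h2⟩) | ⟨h1, h2⟩) | hEq) | hEq
  · have a1 : 65 ≤ c.toNat := Fin.mk_le_mk.mp h1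
    have a2 : c.toNat ≤ 90 := Fin.mk_le_mk.mp h2
    omega
  · have a1 : 97 ≤ c.toNat := Fin.mk_le_mk.mp h1
    have a2 : c.toNat ≤ 122 := Fin.mk_le_mk.mp h2
    omega
  · have a1 : 48 ≤ c.toNat := Fin.mk_le_mk.mp h1
    have a2 : c.toNat ≤ 57 := Fin.mk_le_mk.mp h2
    omega
  · have a1 : c.toNat = 95 := by rw [hEq]; decide
    omega
  · have a1 : c.toNat = 36 := by rw [hEq]; decide
    omega

theorem pv_slice_head (cs : List Char) (p e : Int) (h0 : 0 ≤ p) (hpe : p < e)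
    (hlen : p < (cs.length : Int)) :
    ∃ tl, PySem.List.slice cs (some p) (some e) = pvCh cs p :: tl := by
  rw [PySem.List.slice_toNat cs h0 (by omega : (0:Int) ≤ e)]
  obtain ⟨c, tl', hd⟩ : ∃ c tl', cs.drop p.toNat = c :: tl' := by
    cases hdrop : cs.drop p.toNat with
    | nil => exact absurd (List.drop_eq_nil_iff.mp hdrop) (by omega)
    | cons c tl' => exact ⟨c, tl', rfl⟩
  have htk : e.toNat - p.toNat = (e.toNat - p.toNat - 1) + 1 := by omega
  refine ⟨List.take (e.toNat - p.toNat - 1) tl', ?_⟩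
  have hc : cs[p.toNat]? = some c := by
    have h2 := (List.getElem?_drop (xs := cs) (i := p.toNat) (j := 0)).symm
    rw [hd] at h2; simpa using h2
  have hch : pvCh cs p = c := by simp [pvCh, List.getD, hc]
  rw [hch, hd, htk, List.take_succ_cons]
  simp

theorem pv_runEnd_eq (cs : List Char) (ms : List Bool) (endI j : Int) :
    pvRunEndA cs ms endI j = pvRunEndB cs ms endI j := by
  fun_induction pvRunEndA cs ms endI j with
  | case1 j h hcond ih => rw [pvRunEndB]; simp only [dif_pos h]
                          rw [if_pos (by exact hcond), ih]
  | case2 j h hcond => rw [pvRunEndB]; simp only [dif_pos h]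
                       rw [if_neg (by exact hcond)]
  | case3 j h => rw [pvRunEndB]; simp only [dif_neg h]

theorem pv_runEnd_le (cs : List Char) (ms : List Bool) (endI j : Int) (h : j ≤ endI) :
    pvRunEndB cs ms endI j ≤ endI := by
  fun_induction pvRunEndB cs ms endI j with
  | case1 j h hcond ih => exact ih (by omega)
  | case2 j h hcond => omega
  | case3 j h => omega

theorem pv_runEnd_chars (cs : List Char) (ms : List Bool) (endI : Int) :
    ∀ j k, j ≤ k → k < pvRunEndB cs ms endI j →
      pvCodeB ms k = true ∧ pvIdentCharB (pvCh cs k) = true := by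
  have key : ∀ n : Nat, ∀ j k : Int, (k - j).toNat ≤ n → j ≤ k → k < pvRunEndB cs ms endI j →
      pvCodeB ms k = true ∧ pvIdentCharB (pvCh cs k) = true := by
    intro n
    induction n with
    | zero =>
      intro j k hn hjk hlt
      have hkj : k = j := by omega
      subst hkj
      rw [pvRunEndB] at hlt
      by_cases h : k < endI
      · rw [dif_pos h] at hlt
        by_cases hc : (pvCodeB ms k && pvIdentCharB (pvCh cs k)) = true
        · exact ⟨(Bool.and_eq_true .. |>.mp hc).1, (Bool.and_eq_true .. |>.mp hc).2⟩
        · rw [if_neg hc] at hlt; omega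
      · rw [dif_neg h] at hlt; omega
    | succ n ih =>
      intro j k hn hjk hlt
      by_cases hkj : k = j
      · subst hkj
        rw [pvRunEndB] at hlt
        by_cases h : k < endI
        · rw [dif_pos h] at hlt
          by_cases hc : (pvCodeB ms k && pvIdentCharB (pvCh cs k)) = true
          · exact ⟨(Bool.and_eq_true .. |>.mp hc).1, (Bool.and_eq_true .. |>.mp hc).2⟩
          · rw [if_neg hc] at hlt; omega
        · rw [dif_neg h] at hlt; omega
      · have hjk' : j + 1 ≤ k := by omega
        have hje : j < pvRunEndB cs ms endI j := by omega
        have hrw : pvRunEndB cs ms endI j = pvRunEndB cs ms endI (j + 1) := by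
          rw [pvRunEndB]
          by_cases h : j < endI
          · rw [dif_pos h]
            by_cases hc : (pvCodeB ms j && pvIdentCharB (pvCh cs j)) = true
            · rw [if_pos hc]
            · rw [pvRunEndB, dif_pos h, if_neg hc] at hje; omega
          · rw [pvRunEndB, dif_neg h] at hje; omega
        exact ih (j + 1) k (by omega) hjk' (by rw [← hrw]; exact hlt)
  exact fun j k hjk hlt => key (k - j).toNat j k le_rfl hjk hlt

theorem pv_tok_cons (cs : List Char) (ms : List Bool) (endI : Int) :
    ∀ i t ts, pvTokenize cs ms endI i = t :: ts →
      i ≤ pvTokPos t ∧ pvTokPos t < endI ∧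
      pvCodeB ms (pvTokPos t) = true ∧ PySem.Chars.isspace (pvCh cs (pvTokPos t)) = false ∧
      pvTokenize cs ms endI (pvTokPos t) = t :: ts ∧
      ((∃ c, t = PvTok.p (pvTokPos t) c ∧ c = pvCh cs (pvTokPos t) ∧
          pvIdentCharB c = false ∧ pvTokenize cs ms endI (pvTokPos t + 1) = ts) ∨
       (∃ e str, t = PvTok.id (pvTokPos t) e str ∧
          pvIdentCharB (pvCh cs (pvTokPos t)) = true ∧
          e = pvRunEndB cs ms endI (pvTokPos t + 1) ∧
          str = PySem.List.slice cs (some (pvTokPos t)) (some e) ∧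
          pvTokenize cs ms endI e = ts ∧ pvTokPos t < e ∧ e ≤ endI)) := by
  have key : ∀ n : Nat, ∀ i : Int, (endI - i).toNat ≤ n → ∀ t ts,
      pvTokenize cs ms endI i = t :: ts →
      i ≤ pvTokPos t ∧ pvTokPos t < endI ∧
      pvCodeB ms (pvTokPos t) = true ∧ PySem.Chars.isspace (pvCh cs (pvTokPos t)) = false ∧
      pvTokenize cs ms endI (pvTokPos t) = t :: ts ∧
      ((∃ c, t = PvTok.p (pvTokPos t) c ∧ c = pvCh cs (pvTokPos t) ∧
          pvIdentCharB c = false ∧ pvTokenize cs ms endI (pvTokPos t + 1) = ts) ∨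
       (∃ e str, t = PvTok.id (pvTokPos t) e str ∧
          pvIdentCharB (pvCh cs (pvTokPos t)) = true ∧
          e = pvRunEndB cs ms endI (pvTokPos t + 1) ∧
          str = PySem.List.slice cs (some (pvTokPos t)) (some e) ∧
          pvTokenize cs ms endI e = ts ∧ pvTokPos t < e ∧ e ≤ endI)) := by
    intro n
    induction n with
    | zero =>
      intro i hn t ts h
      rw [pvTokenize, dif_neg (by omega : ¬ i < endI)] at h; cases h
    | succ n ih =>
      intro i hn t ts h
      by_cases hi : i < endI
      · by_cases hc : pvCodeB ms i = true
        · by_cases hsp : PySem.Chars.isspace (pvCh cs i) = true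
          · rw [pvTokenize, dif_pos hi, if_neg (by simp [hc]), if_pos hsp] at h
            obtain ⟨a1, rest⟩ := ih (i + 1) (by omega) t ts h
            exact ⟨by omega, rest⟩
          · have hsp' : PySem.Chars.isspace (pvCh cs i) = false := by
              simpa using hsp
            rw [pvTokenize, dif_pos hi, if_neg (by simp [hc]), if_neg hsp] at h
            by_cases hid : pvIdentCharB (pvCh cs i) = true
            · rw [if_pos hid] at h
              injection h with h1 h2
              subst h1
              have hpos : pvTokPos (PvTok.id i (pvRunEndB cs ms endI (i + 1))
                  (PySem.List.slice cs (some i) (some (pvRunEndB cs ms endI (i + 1))))) = i := rfl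
              simp only [pvTokPos]
              refine ⟨le_rfl, hi, hc, hsp', ?_, Or.inr ⟨_, _, rfl, hid, rfl, rfl, h2, ?_, ?_⟩⟩
              · rw [pvTokenize, dif_pos hi, if_neg (by simp [hc]), if_neg hsp, if_pos hid, h2]
              · have := pvRunEndB_ge cs ms endI (i + 1); omega
              · exact pv_runEnd_le cs ms endI (i + 1) (by omega)
            · rw [if_neg hid] at h
              injection h with h1 h2
              subst h1
              have hid' : pvIdentCharB (pvCh cs i) = false := by simpa using hid
              simp only [pvTokPos]
              refine ⟨le_rfl, hi, hc, hsp', ?_, Or.inl ⟨_, rfl, rfl, hid', h2⟩⟩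
              rw [pvTokenize, dif_pos hi, if_neg (by simp [hc]), if_neg hsp, if_neg hid, h2]
        · rw [pvTokenize, dif_pos hi, if_pos (by simp [hc])] at h
          obtain ⟨a1, rest⟩ := ih (i + 1) (by omega) t ts h
          exact ⟨by omega, rest⟩
      · rw [pvTokenize, dif_neg hi] at h; cases h
  exact fun i t ts h => key (endI - i).toNat i le_rfl t ts h

theorem pv_skip_tok (cs : List Char) (ms : List Bool) (endI : Int) :
    ∀ i, pvTokenize cs ms endI (pvSkipWsA cs ms endI i) = pvTokenize cs ms endI i ∧
      i ≤ pvSkipWsA cs ms endI i ∧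
      (pvTokenize cs ms endI i = [] → endI ≤ pvSkipWsA cs ms endI i) ∧
      (∀ t ts, pvTokenize cs ms endI i = t :: ts → pvSkipWsA cs ms endI i = pvTokPos t) := by
  have base : ∀ i : Int, ¬ i < endI →
      pvTokenize cs ms endI (pvSkipWsA cs ms endI i) = pvTokenize cs ms endI i ∧
      i ≤ pvSkipWsA cs ms endI i ∧
      (pvTokenize cs ms endI i = [] → endI ≤ pvSkipWsA cs ms endI i) ∧
      (∀ t ts, pvTokenize cs ms endI i = t :: ts → pvSkipWsA cs ms endI i = pvTokPos t) := by
    intro i hi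
    have hs : pvSkipWsA cs ms endI i = i := by rw [pvSkipWsA, dif_neg hi]
    have ht : pvTokenize cs ms endI i = [] := by rw [pvTokenize, dif_neg hi]
    rw [hs]
    exact ⟨rfl, le_rfl, fun _ => by omega, fun t ts h => by rw [ht] at h; cases h⟩
  have key : ∀ n : Nat, ∀ i : Int, (endI - i).toNat ≤ n →
      pvTokenize cs ms endI (pvSkipWsA cs ms endI i) = pvTokenize cs ms endI i ∧
      i ≤ pvSkipWsA cs ms endI i ∧
      (pvTokenize cs ms endI i = [] → endI ≤ pvSkipWsA cs ms endI i) ∧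
      (∀ t ts, pvTokenize cs ms endI i = t :: ts → pvSkipWsA cs ms endI i = pvTokPos t) := by
    intro n
    induction n with
    | zero => intro i hn; exact base i (by omega)
    | succ n ih =>
      intro i hn
      by_cases hi : i < endI
      · by_cases hc : pvCodeB ms i = true
        · by_cases hsp : PySem.Chars.isspace (pvCh cs i) = true
          · have hs : pvSkipWsA cs ms endI i = pvSkipWsA cs ms endI (i + 1) := by
              rw [pvSkipWsA, dif_pos hi, if_neg (by simp [pv_code_eq, hc]), if_pos hsp]
            have ht : pvTokenize cs ms endI i = pvTokenize cs ms endI (i + 1) := by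
              rw [pvTokenize, dif_pos hi, if_neg (by simp [hc]), if_pos hsp]
            obtain ⟨a1, a2, a3, a4⟩ := ih (i + 1) (by omega)
            rw [hs, ht]
            exact ⟨a1, by omega, a3, a4⟩
          · have hs : pvSkipWsA cs ms endI i = i := by
              rw [pvSkipWsA, dif_pos hi, if_neg (by simp [pv_code_eq, hc]), if_neg hsp]
            refine ⟨by rw [hs], by omega, fun h => ?_, fun t ts h => ?_⟩
            · rw [pvTokenize, dif_pos hi, if_neg (by simp [hc]), if_neg hsp] at h
              by_cases hid : pvIdentCharB (pvCh cs i) = true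
              · rw [if_pos hid] at h; cases h
              · rw [if_neg hid] at h; cases h
            · rw [pvTokenize, dif_pos hi, if_neg (by simp [hc]), if_neg hsp] at h
              by_cases hid : pvIdentCharB (pvCh cs i) = true
              · rw [if_pos hid] at h
                injection h with h1 h2
                rw [hs, ← h1]; rfl
              · rw [if_neg hid] at h
                injection h with h1 h2
                rw [hs, ← h1]; rfl
        · have hs : pvSkipWsA cs ms endI i = pvSkipWsA cs ms endI (i + 1) := by
            rw [pvSkipWsA, dif_pos hi, if_pos (by simp [pv_code_eq, hc])]
          have ht : pvTokenize cs ms endI i = pvTokenize cs ms endI (i + 1) := by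
            rw [pvTokenize, dif_pos hi, if_pos (by simp [hc])]
          obtain ⟨a1, a2, a3, a4⟩ := ih (i + 1) (by omega)
          rw [hs, ht]
          exact ⟨a1, by omega, a3, a4⟩
      · exact base i hi
  exact fun i => key (endI - i).toNat i le_rfl

theorem pv_bal_run (cs : List Char) (ms : List Bool) (endI : Int) (oc cc : Char)
    (hoc : pvIdentCharB oc = false) (hcc : pvIdentCharB cc = false) :
    ∀ n : Nat, ∀ k e depth : Int, (e - k).toNat ≤ n → k ≤ e → e ≤ endI →
      (∀ m, k ≤ m → m < e → pvCodeB ms m = true ∧ pvIdentCharB (pvCh cs m) = true) →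
      pvBalLoopA cs ms endI oc cc k depth = pvBalLoopA cs ms endI oc cc e depth := by
  intro n
  induction n with
  | zero =>
    intro k e depth hn hke hee hch
    have : k = e := by omega
    rw [this]
  | succ n ih =>
    intro k e depth hn hke hee hch
    by_cases hkeq : k = e
    · rw [hkeq]
    · have hk : k < endI := by omega
      obtain ⟨hc, hid⟩ := hch k le_rfl (by omega)
      have h1 : (pvCh cs k == oc) = false := pv_ne_of_pred _ _ hid hoc
      have h2 : (pvCh cs k == cc) = false := pv_ne_of_pred _ _ hid hcc
      rw [pvBalLoopA, dif_pos hk, if_neg (by simp [pv_code_eq, hc]),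
        if_neg (by simp [h1]), if_neg (by simp [h2])]
      exact ih (k + 1) e depth (by omega) (by omega) hee
        (fun m hm1 hm2 => hch m (by omega) hm2)

theorem pv_bal_tok (cs : List Char) (ms : List Bool) (endI : Int) (oc cc : Char)
    (hoc : pvIdentCharB oc = false) (hcc : pvIdentCharB cc = false)
    (hso : PySem.Chars.isspace oc = false) (hsc : PySem.Chars.isspace cc = false) :
    ∀ i depth, 0 ≤ i → i ≤ endI →
      pvTokenize cs ms endI (pvBalLoopA cs ms endI oc cc i depth) =
        pvSkipGroupB oc cc (pvTokenize cs ms endI i) depth ∧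
      i ≤ pvBalLoopA cs ms endI oc cc i depth ∧
      (i < endI → i < pvBalLoopA cs ms endI oc cc i depth) ∧
      pvBalLoopA cs ms endI oc cc i depth ≤ endI := by
  have base : ∀ i depth : Int, ¬ i < endI → i ≤ endI →
      pvTokenize cs ms endI (pvBalLoopA cs ms endI oc cc i depth) =
        pvSkipGroupB oc cc (pvTokenize cs ms endI i) depth ∧
      i ≤ pvBalLoopA cs ms endI oc cc i depth ∧
      (i < endI → i < pvBalLoopA cs ms endI oc cc i depth) ∧
      pvBalLoopA cs ms endI oc cc i depth ≤ endI := by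
    intro i depth hi hie
    have hb : pvBalLoopA cs ms endI oc cc i depth = endI := by rw [pvBalLoopA, dif_neg hi]
    have hte : pvTokenize cs ms endI endI = [] := by
      rw [pvTokenize, dif_neg (by omega)]
    have hti : pvTokenize cs ms endI i = [] := by
      rw [pvTokenize, dif_neg hi]
    rw [hb, hte, hti]
    exact ⟨by simp [pvSkipGroupB], by omega, by omega, by omega⟩
  have key : ∀ n : Nat, ∀ i depth : Int, (endI - i).toNat ≤ n → 0 ≤ i → i ≤ endI →
      pvTokenize cs ms endI (pvBalLoopA cs ms endI oc cc i depth) =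
        pvSkipGroupB oc cc (pvTokenize cs ms endI i) depth ∧
      i ≤ pvBalLoopA cs ms endI oc cc i depth ∧
      (i < endI → i < pvBalLoopA cs ms endI oc cc i depth) ∧
      pvBalLoopA cs ms endI oc cc i depth ≤ endI := by
    intro n
    induction n with
    | zero => intro i depth hn h0 hie; exact base i depth (by omega) hie
    | succ n ih =>
      intro i depth hn h0 hie
      by_cases hi : i < endI
      · by_cases hc : pvCodeB ms i = true
        · by_cases hsp : PySem.Chars.isspace (pvCh cs i) = true
          · -- code whitespace: both sides step over it
            have h1 : (pvCh cs i == oc) = false := pv_ne_of_pred _ _ hsp hso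
            have h2 : (pvCh cs i == cc) = false := pv_ne_of_pred _ _ hsp hsc
            have hb : pvBalLoopA cs ms endI oc cc i depth =
                pvBalLoopA cs ms endI oc cc (i + 1) depth := by
              rw [pvBalLoopA, dif_pos hi, if_neg (by simp [pv_code_eq, hc]),
                if_neg (by simp [h1]), if_neg (by simp [h2])]
            have ht : pvTokenize cs ms endI i = pvTokenize cs ms endI (i + 1) := by
              rw [pvTokenize, dif_pos hi, if_neg (by simp [hc]), if_pos hsp]
            obtain ⟨a1, a2, a3, a4⟩ := ih (i + 1) depth (by omega) (by omega) (by omega)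
            rw [hb, ht]
            exact ⟨a1, by omega, by omega, a4⟩
          · by_cases hid : pvIdentCharB (pvCh cs i) = true
            · -- identifier run: A walks through it char by char, B skips one token
              have hge := pvRunEndB_ge cs ms endI (i + 1)
              have hle := pv_runEnd_le cs ms endI (i + 1) (by omega)
              have hrun : pvBalLoopA cs ms endI oc cc i depth =
                  pvBalLoopA cs ms endI oc cc (pvRunEndB cs ms endI (i + 1)) depth := by
                refine pv_bal_run cs ms endI oc cc hoc hcc
                  (pvRunEndB cs ms endI (i + 1) - i).toNat i _ depth le_rfl (by omega) hle ?_
                intro m hm1 hm2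
                rcases eq_or_lt_of_le hm1 with heq | hlt
                · rw [← heq]; exact ⟨hc, hid⟩
                · exact pv_runEnd_chars cs ms endI (i + 1) m (by omega) hm2
              have ht : pvTokenize cs ms endI i =
                  PvTok.id i (pvRunEndB cs ms endI (i + 1))
                    (PySem.List.slice cs (some i) (some (pvRunEndB cs ms endI (i + 1)))) ::
                  pvTokenize cs ms endI (pvRunEndB cs ms endI (i + 1)) := by
                rw [pvTokenize, dif_pos hi, if_neg (by simp [hc]), if_neg hsp, if_pos hid]
              obtain ⟨a1, a2, a3, a4⟩ :=
                ih (pvRunEndB cs ms endI (i + 1)) depth (by omega) (by omega) hle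
              rw [hrun, ht]
              exact ⟨by simpa [pvSkipGroupB] using a1, by omega, by omega, a4⟩
            · -- punctuation character = one punctuation token
              have ht : pvTokenize cs ms endI i =
                  PvTok.p i (pvCh cs i) :: pvTokenize cs ms endI (i + 1) := by
                rw [pvTokenize, dif_pos hi, if_neg (by simp [hc]), if_neg hsp, if_neg hid]
              rw [pvBalLoopA, dif_pos hi, if_neg (by simp [pv_code_eq, hc]), ht]
              by_cases ho : (pvCh cs i == oc) = true
              · rw [if_pos ho]
                obtain ⟨a1, a2, a3, a4⟩ := ih (i + 1) (depth + 1) (by omega) (by omega) (by omega)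
                refine ⟨?_, by omega, by omega, a4⟩
                rw [a1]; simp only [pvSkipGroupB]; rw [if_pos ho]
              · rw [if_neg ho]
                by_cases hcl : (pvCh cs i == cc) = true
                · rw [if_pos hcl]
                  by_cases hd : depth - 1 = 0
                  · rw [if_pos hd]
                    refine ⟨?_, by omega, by omega, by omega⟩
                    simp only [pvSkipGroupB]
                    rw [if_neg (by simp at ho ⊢; exact ho), if_pos hcl,
                      if_pos hd]
                  · rw [if_neg hd]
                    obtain ⟨a1, a2, a3, a4⟩ :=
                      ih (i + 1) (depth - 1) (by omega) (by omega) (by omega)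
                    refine ⟨?_, by omega, by omega, a4⟩
                    rw [a1]; simp only [pvSkipGroupB]
                    rw [if_neg (by simp at ho ⊢; exact ho), if_pos hcl,
                      if_neg hd]
                · rw [if_neg hcl]
                  obtain ⟨a1, a2, a3, a4⟩ := ih (i + 1) depth (by omega) (by omega) (by omega)
                  refine ⟨?_, by omega, by omega, a4⟩
                  rw [a1]; simp only [pvSkipGroupB]
                  rw [if_neg (by simp at ho ⊢; exact ho),
                    if_neg (by simp at hcl ⊢; exact hcl)]
        · have hb : pvBalLoopA cs ms endI oc cc i depth =
              pvBalLoopA cs ms endI oc cc (i + 1) depth := by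
            rw [pvBalLoopA, dif_pos hi, if_pos (by simp [pv_code_eq, hc])]
          have ht : pvTokenize cs ms endI i = pvTokenize cs ms endI (i + 1) := by
            rw [pvTokenize, dif_pos hi, if_pos (by simp [hc])]
          obtain ⟨a1, a2, a3, a4⟩ := ih (i + 1) depth (by omega) (by omega) (by omega)
          rw [hb, ht]
          exact ⟨a1, by omega, by omega, a4⟩
      · exact base i depth hi hie
  exact fun i depth h0 hie => key (endI - i).toNat i depth le_rfl h0 hie

theorem pv_skipGroup_len (oc cc : Char) :
    ∀ ts depth, (pvSkipGroupB oc cc ts depth).length ≤ ts.length := by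
  intro ts
  induction ts with
  | nil => intro depth; simp [pvSkipGroupB]
  | cons t rest ih =>
    intro depth
    cases t with
    | id a b str => simpa [pvSkipGroupB] using Nat.le_succ_of_le (ih depth)
    | p q ch =>
      simp only [pvSkipGroupB]
      split_ifs with h1 h2 h3
      · exact Nat.le_succ_of_le (ih (depth + 1))
      · simp
      · exact Nat.le_succ_of_le (ih (depth - 1))
      · exact Nat.le_succ_of_le (ih depth)

theorem pv_span2 (ms : List Bool) (j : Int) (h0 : 0 ≤ j) :
    pvIsCodeSpanA ms j (j + 2) = true ↔ pvCodeB ms j = true ∧ pvCodeB ms (j + 1) = true := by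
  unfold pvIsCodeSpanA
  by_cases hif : j < 0 ∨ (ms.length : Int) < j + 2 ∨ j + 2 ≤ j
  · rw [if_pos hif]
    constructor
    · intro h; cases h
    · rintro ⟨h1, h2⟩
      exfalso
      simp only [pvCodeB, Bool.and_eq_true, decide_eq_true_eq] at h1 h2
      omega
  · rw [if_neg hif]
    rw [not_or, not_or] at hif
    rw [PySem.List.pyRange_one_cons (by omega), PySem.List.pyRange_one_cons (by omega),
      PySem.List.pyRange_one_eq_nil (by omega)]
    simp only [List.all_cons, List.all_nil, Bool.and_true, Bool.and_eq_true]
    unfold pvCodeB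
    simp only [Bool.and_eq_true, decide_eq_true_eq]
    constructor
    · rintro ⟨h1, h2⟩; exact ⟨⟨⟨by omega, by omega⟩, h1⟩, ⟨by omega, by omega⟩, h2⟩
    · rintro ⟨⟨_, h1⟩, ⟨_, h2⟩⟩; exact ⟨h1, h2⟩

theorem pv_parse_ge (cs : List Char) (ms : List Bool) (endI x : Int) (h : endI ≤ x) :
    pvParseIdA cs ms endI x = (-1, -1) := by
  unfold pvParseIdA; rw [if_pos h]

theorem pv_parse_punct (cs : List Char) (ms : List Bool) (endI q : Int) (hq : q < endI)
    (hcode : pvCodeB ms q = true) (hid : pvIdentCharB (pvCh cs q) = false) :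
    pvParseIdA cs ms endI q = (-1, -1) := by
  obtain ⟨ha, hu⟩ := pv_not_ident _ hid
  unfold pvParseIdA
  rw [if_neg (by omega), if_neg (by simp [pv_code_eq, hcode]), if_pos (by simp [ha, hu])]

theorem pv_parse_noalpha (cs : List Char) (ms : List Bool) (endI q : Int) (hq : q < endI)
    (hal : (PySem.Chars.isalpha (pvCh cs q) || pvCh cs q == '_') = false) :
    pvParseIdA cs ms endI q = (-1, -1) := by
  unfold pvParseIdA
  by_cases hcode : pvCodeB ms q = true
  · rw [if_neg (by omega), if_neg (by simp [pv_code_eq, hcode]), if_pos (by simp [hal])]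
  · rw [if_neg (by omega), if_pos (by simp [pv_code_eq, hcode])]

theorem pv_parse_id (cs : List Char) (ms : List Bool) (endI q e : Int) (hq : q < endI)
    (hcode : pvCodeB ms q = true)
    (hal : (PySem.Chars.isalpha (pvCh cs q) || pvCh cs q == '_') = true)
    (he : e = pvRunEndB cs ms endI (q + 1)) :
    pvParseIdA cs ms endI q = (q, e) := by
  unfold pvParseIdA
  rw [if_neg (by omega), if_neg (by simp [pv_code_eq, hcode]), if_neg (by simp [hal]),
    pv_runEnd_eq, ← he]

def pvRel (cs : List Char) (ms : List Bool) (endI : Int)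
    (oA : Option Int) (oB : Option (List PvTok)) : Prop :=
  (oA = none ∧ oB = none) ∨
  (∃ j ts', oA = some j ∧ oB = some ts' ∧ 0 ≤ j ∧ pvTokenize cs ms endI j = ts')

theorem pvWalkB_id (f : Nat) (a b : Int) (s : List Char) (rest : List PvTok) :
    pvWalkB (f + 1) (PvTok.id a b s :: rest) = some (PvTok.id a b s :: rest) := rfl

theorem pvWalkB_colon_adj (f : Nat) (p1 : Int) (t3 : PvTok) (r3 : List PvTok) :
    pvWalkB (f + 1) (PvTok.p p1 ':' :: PvTok.p (p1 + 1) ':' :: t3 :: r3) =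
      (if pvIsIdentB t3 then pvWalkB f r3 else none) := by
  simp [pvWalkB]

theorem pvWalkB_colon_adj_nil (f : Nat) (p1 : Int) :
    pvWalkB (f + 1) [PvTok.p p1 ':', PvTok.p (p1 + 1) ':'] = none := by
  simp [pvWalkB]

theorem pvWalkB_colon_nil (f : Nat) (p1 : Int) :
    pvWalkB (f + 1) [PvTok.p p1 ':'] = some [PvTok.p p1 ':'] := by
  simp [pvWalkB]

theorem pvWalkB_colon_id (f : Nat) (p1 a b : Int) (s : List Char) (r : List PvTok) :
    pvWalkB (f + 1) (PvTok.p p1 ':' :: PvTok.id a b s :: r) =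
      some (PvTok.p p1 ':' :: PvTok.id a b s :: r) := by
  simp [pvWalkB]

theorem pvWalkB_colon_p (f : Nat) (p1 p2 : Int) (c2 : Char) (r : List PvTok)
    (h : (c2 == ':' && p2 == p1 + 1) = false) :
    pvWalkB (f + 1) (PvTok.p p1 ':' :: PvTok.p p2 c2 :: r) =
      some (PvTok.p p1 ':' :: PvTok.p p2 c2 :: r) := by
  simp only [pvWalkB]
  rw [if_pos (by decide), if_neg (by simp [h])]

theorem pvWalkB_hash_nil (f : Nat) (p1 : Int) :
    pvWalkB (f + 1) [PvTok.p p1 '#'] = pvWalkB f [] := by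
  simp [pvWalkB]

theorem pvWalkB_hash_id (f : Nat) (p1 a b : Int) (s : List Char) (r : List PvTok) :
    pvWalkB (f + 1) (PvTok.p p1 '#' :: PvTok.id a b s :: r) =
      pvWalkB f (PvTok.id a b s :: r) := by
  simp [pvWalkB]

theorem pvWalkB_hash_paren (f : Nat) (p1 q : Int) (r : List PvTok) :
    pvWalkB (f + 1) (PvTok.p p1 '#' :: PvTok.p q '(' :: r) =
      pvWalkB f (pvSkipGroupB '(' ')' (PvTok.p q '(' :: r) 0) := by
  simp [pvWalkB]

theorem pvWalkB_hash_p (f : Nat) (p1 q : Int) (c2 : Char) (r : List PvTok) (h : c2 ≠ '(') :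
    pvWalkB (f + 1) (PvTok.p p1 '#' :: PvTok.p q c2 :: r) =
      pvWalkB f (PvTok.p q c2 :: r) := by
  simp only [pvWalkB]
  rw [if_neg (by decide), if_pos (by decide)]
  split
  · next heq =>
    exfalso
    injection heq with ha hb
    injection ha with ha1 ha2
    exact h ha2
  · rfl

theorem pvWalkB_bracket (f : Nat) (p1 : Int) (rest : List PvTok) :
    pvWalkB (f + 1) (PvTok.p p1 '[' :: rest) =
      pvWalkB f (pvSkipGroupB '[' ']' (PvTok.p p1 '[' :: rest) 0) := by
  simp only [pvWalkB]
  rw [if_neg (by decide), if_neg (by decide), if_pos (by decide)]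

theorem pvWalkB_punct (f : Nat) (p1 : Int) (c : Char) (rest : List PvTok)
    (h1 : c ≠ ':') (h2 : c ≠ '#') (h3 : c ≠ '[') :
    pvWalkB (f + 1) (PvTok.p p1 c :: rest) = some (PvTok.p p1 c :: rest) := by
  simp only [pvWalkB]
  rw [if_neg (by simp [h1]), if_neg (by simp [h2]), if_neg (by simp [h3])]

theorem pv_loop_walk (cs : List Char) (ms : List Bool) (endI : Int) (hE : endI ≤ (cs.length : Int)) :
    ∀ fA fB i ts, 0 ≤ i → pvTokenize cs ms endI i = ts →
      (endI - i).toNat < fA → ts.length < fB →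
      pvRel cs ms endI (pvLoopA cs ms endI fA i) (pvWalkB fB ts) := by
  intro fA
  induction fA with
  | zero => intro fB i ts _ _ hfa _; exact absurd hfa (Nat.not_lt_zero _)
  | succ fA ih =>
    intro fB i ts h0 hts hfa hfb
    cases fB with
    | zero => exact absurd hfb (Nat.not_lt_zero _)
    | succ fB =>
    obtain ⟨hskipT, hskip_ge, hskip_end, hskip_pos⟩ := pv_skip_tok cs ms endI i
    cases hts0 : pvTokenize cs ms endI i with
    | nil =>
      have hts' : ts = [] := by rw [← hts, hts0]
      subst hts'
      have hj : endI ≤ pvSkipWsA cs ms endI i := hskip_end hts0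
      simp only [pvLoopA]
      rw [if_neg (by
            simp only [Bool.and_eq_true, decide_eq_true_eq]
            rintro ⟨⟨⟨h1, _⟩, _⟩, _⟩
            omega),
        if_neg (by
            simp only [Bool.and_eq_true, decide_eq_true_eq]
            rintro ⟨⟨h1, _⟩, _⟩
            omega),
        if_neg (by
            simp only [Bool.and_eq_true, decide_eq_true_eq]
            rintro ⟨⟨h1, _⟩, _⟩
            omega)]
      exact Or.inr ⟨_, [], rfl, rfl, by omega, by rw [hskipT, hts0]⟩
    | cons t ts' =>
      have hts'' : ts = t :: ts' := by rw [← hts, hts0]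
      subst hts''
      obtain ⟨hip, hpend, hcode, hspace, hTp, hcase⟩ := pv_tok_cons cs ms endI i t ts' hts0
      obtain ⟨p, hp⟩ : ∃ x, pvTokPos t = x := ⟨_, rfl⟩
      rw [hp] at hip hpend hcode hspace hTp hcase
      have hj : pvSkipWsA cs ms endI i = p := by rw [hskip_pos t ts' hts0, hp]
      have hiend : i < endI := by omega
      have h0p : 0 ≤ p := by omega
      rcases hcase with ⟨c, htp, hcv, hcid, hTnext⟩ |
        ⟨e, str, htp, hid, hestr, hstr, hTe, hlt, hle⟩
      · -- t is a punctuation token .p p c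
        subst htp
        simp only [pvLoopA, hj]
        by_cases hcolon : c = ':'
        · subst hcolon
          by_cases hnx : p + 1 < endI ∧ pvCodeB ms (p + 1) = true ∧ pvCh cs (p + 1) = ':'
          · obtain ⟨hn1, hn2, hn3⟩ := hnx
            have hT1 : pvTokenize cs ms endI (p + 1) =
                PvTok.p (p + 1) ':' :: pvTokenize cs ms endI (p + 2) := by
              have h2 : p + 1 + 1 = p + 2 := by ring
              rw [pvTokenize, dif_pos hn1, if_neg (by simp [hn2]),
                if_neg (by rw [hn3]; decide), if_neg (by rw [hn3]; decide), hn3, h2]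
            have hts1 : ts' = PvTok.p (p + 1) ':' :: pvTokenize cs ms endI (p + 2) := by
              rw [← hTnext, hT1]
            have hspan : pvIsCodeSpanA ms p (p + 2) = true :=
              (pv_span2 ms p h0p).mpr ⟨hcode, hn2⟩
            rw [if_pos (by simp [← hcv, hspan, hn1, hn3])]
            obtain ⟨sk1, sk2, sk3, sk4⟩ := pv_skip_tok cs ms endI (p + 2)
            cases hv : pvTokenize cs ms endI (p + 2) with
            | nil =>
              have hge : endI ≤ pvSkipWsA cs ms endI (p + 2) := sk3 hv
              have hpr := pv_parse_ge cs ms endI _ hge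
              simp only [hpr]
              rw [if_pos (by norm_num)]
              have hts2 : ts' = [PvTok.p (p + 1) ':'] := by rw [hts1, hv]
              rw [hts2, pvWalkB_colon_adj_nil]
              exact Or.inl ⟨rfl, rfl⟩
            | cons t3 ts3 =>
              have hts2 : ts' = PvTok.p (p + 1) ':' :: t3 :: ts3 := by rw [hts1, hv]
              rw [hts2, pvWalkB_colon_adj]
              obtain ⟨h3ip, h3end, h3code, h3space, h3Tp, h3case⟩ :=
                pv_tok_cons cs ms endI (p + 2) t3 ts3 hv
              obtain ⟨q, hq⟩ : ∃ x, pvTokPos t3 = x := ⟨_, rfl⟩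
              rw [hq] at h3ip h3end h3code h3space h3Tp h3case
              have hskq : pvSkipWsA cs ms endI (p + 2) = q := by rw [sk4 t3 ts3 hv, hq]
              rw [hskq]
              rcases h3case with ⟨c3, ht3, hcv3, hcid3, hT3next⟩ |
                ⟨e3, str3, ht3, hid3, he3, hstr3, hT3e, hlt3, hle3⟩
              · subst ht3
                have hpr := pv_parse_punct cs ms endI q h3end h3code
                  (by rwa [hcv3] at hcid3)
                simp only [hpr]
                rw [if_pos (by norm_num), if_neg (by simp [pvIsIdentB])]
                exact Or.inl ⟨rfl, rfl⟩
              · subst ht3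
                obtain ⟨tl, hsl⟩ := pv_slice_head cs q e3 (by omega) hlt3 (by omega)
                rw [← hstr3] at hsl
                by_cases hal : (PySem.Chars.isalpha (pvCh cs q) || pvCh cs q == '_') = true
                · have hpr := pv_parse_id cs ms endI q e3 h3end h3code hal he3
                  simp only [hpr]
                  rw [if_neg (by omega : ¬ e3 < 0), hsl,
                    if_pos (by simp only [pvIsIdentB]; exact hal)]
                  exact ih fB e3 ts3 (by omega) hT3e (by omega)
                    (by simp [hts1, hv] at hfb; omega)
                · have hpr := pv_parse_noalpha cs ms endI q h3end (by simpa using hal)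
                  simp only [hpr]
                  rw [if_pos (by norm_num), hsl,
                    if_neg (by simp only [pvIsIdentB]; simpa using hal)]
                  exact Or.inl ⟨rfl, rfl⟩
          · rw [if_neg (by
                simp only [Bool.and_eq_true, decide_eq_true_eq, beq_iff_eq]
                rintro ⟨⟨⟨h1, h2⟩, _⟩, h4⟩
                exact hnx ⟨h1, ((pv_span2 ms p h0p).mp h2).2, h4⟩),
              if_neg (by simp [← hcv]), if_neg (by simp [← hcv])]
            cases hv : ts' with
            | nil =>
              rw [pvWalkB_colon_nil]
              exact Or.inr ⟨p, _, rfl, rfl, h0p, by rw [hTp, hv]⟩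
            | cons t2 r2 =>
              cases t2 with
              | id a b s =>
                rw [pvWalkB_colon_id]
                exact Or.inr ⟨p, _, rfl, rfl, h0p, by rw [hTp, hv]⟩
              | p p2 c2 =>
                have hcond : (c2 == ':' && p2 == p + 1) = false := by
                  by_contra hcb
                  have hcb' : (c2 == ':' && p2 == p + 1) = true := by
                    revert hcb; cases h : (c2 == ':' && p2 == p + 1) <;> simp
                  simp only [Bool.and_eq_true, beq_iff_eq] at hcb'
                  obtain ⟨hc2, hp2⟩ := hcb'
                  have h5 : pvTokenize cs ms endI (p + 1) = PvTok.p p2 c2 :: r2 := by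
                    rw [hTnext, hv]
                  obtain ⟨h6ip, h6end, h6code, h6space, h6Tp, h6case⟩ :=
                    pv_tok_cons cs ms endI (p + 1) _ r2 h5
                  rcases h6case with ⟨c6, ht6, hcv6, _, _⟩ | ⟨e6, str6, ht6, _⟩
                  · simp only [pvTokPos] at h6end h6code hcv6 ht6
                    injection ht6 with ha hb
                    exact hnx ⟨by omega, by rw [← hp2]; exact h6code,
                      by rw [← hp2, ← hcv6, ← hb, hc2]⟩
                  · cases ht6
                rw [pvWalkB_colon_p _ _ _ _ _ hcond]
                exact Or.inr ⟨p, _, rfl, rfl, h0p, by rw [hTp, hv]⟩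
        · by_cases hhash : c = '#'
          · subst hhash
            rw [if_neg (by simp [← hcv]),
              if_pos (by simp [pv_code_eq, hcode, ← hcv, hpend])]
            obtain ⟨sk1, sk2, sk3, sk4⟩ := pv_skip_tok cs ms endI (p + 1)
            cases hv : ts' with
            | nil =>
              have hTn : pvTokenize cs ms endI (p + 1) = [] := by rw [hTnext, hv]
              have hge : endI ≤ pvSkipWsA cs ms endI (p + 1) := sk3 hTn
              rw [pvSkipBalA, if_pos (Or.inl hge), pvWalkB_hash_nil]
              exact ih fB _ [] (by omega) (by rw [sk1, hTn]) (by omega)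
                (by simp at hfb ⊢; omega)
            | cons t2 ts2 =>
              have htv : pvTokenize cs ms endI (p + 1) = t2 :: ts2 := by rw [hTnext, hv]
              obtain ⟨h2ip, h2end, h2code, h2space, h2Tp, h2case⟩ :=
                pv_tok_cons cs ms endI (p + 1) t2 ts2 htv
              obtain ⟨q2, hq2⟩ : ∃ x, pvTokPos t2 = x := ⟨_, rfl⟩
              rw [hq2] at h2ip h2end h2code h2space h2Tp h2case
              have hskq2 : pvSkipWsA cs ms endI (p + 1) = q2 := by rw [sk4 t2 ts2 htv, hq2]
              rw [hskq2]
              rcases h2case with ⟨c2, ht2, hcv2, hcid2, hT2next⟩ |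
                ⟨e2, str2, ht2, hid2, he2, hstr2, hT2e, hlt2, hle2⟩
              · subst ht2
                by_cases hpar : c2 = '('
                · subst hpar
                  rw [pvSkipBalA, if_neg (by
                      rintro (h | h | h)
                      · omega
                      · exact h (by simp [pv_code_eq, h2code])
                      · exact h (by simp [← hcv2]))]
                  obtain ⟨b1, b2, b3, b4⟩ := pv_bal_tok cs ms endI '(' ')'
                    (by decide) (by decide) (by decide) (by decide) q2 0 (by omega) (by omega)
                  have hsg : pvSkipGroupB '(' ')' (PvTok.p q2 '(' :: ts2) 0 =
                      pvSkipGroupB '(' ')' ts2 1 := by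
                    simp [pvSkipGroupB]
                  rw [pvWalkB_hash_paren]
                  exact ih fB _ _ (by omega) (by rw [b1, h2Tp]) (by have := b3 h2end; omega)
                    (by rw [hsg]
                        have := pv_skipGroup_len '(' ')' ts2 1
                        simp [hv] at hfb
                        omega)
                · rw [pvSkipBalA, if_pos (Or.inr (Or.inr (by simp [← hcv2, hpar]))),
                    pvWalkB_hash_p _ _ _ _ _ hpar]
                  exact ih fB q2 _ (by omega) h2Tp (by omega)
                    (by simp [hv] at hfb; simp; omega)
              · subst ht2
                rw [pvSkipBalA, if_pos (Or.inr (Or.inr (by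
                    simp [pv_ne_of_pred _ _ hid2 (by decide : pvIdentCharB '(' = false)]))),
                  pvWalkB_hash_id]
                exact ih fB q2 _ (by omega) h2Tp (by omega)
                  (by simp [hv] at hfb; simp; omega)
          · by_cases hbr : c = '['
            · subst hbr
              rw [if_neg (by simp [← hcv]), if_neg (by simp [← hcv]),
                if_pos (by simp [pv_code_eq, hcode, ← hcv, hpend])]
              rw [pvSkipBalA, if_neg (by
                  rintro (h | h | h)
                  · omega
                  · exact h (by simp [pv_code_eq, hcode])
                  · exact h (by simp [← hcv]))]
              obtain ⟨b1, b2, b3, b4⟩ := pv_bal_tok cs ms endI '[' ']'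
                (by decide) (by decide) (by decide) (by decide) p 0 h0p (by omega)
              have hsg : pvSkipGroupB '[' ']' (PvTok.p p '[' :: ts') 0 =
                  pvSkipGroupB '[' ']' ts' 1 := by
                simp [pvSkipGroupB]
              rw [pvWalkB_bracket]
              exact ih fB _ _ (by omega) (by rw [b1, hTp]) (by have := b3 hpend; omega)
                (by rw [hsg]
                    have := pv_skipGroup_len '[' ']' ts' 1
                    simp at hfb
                    omega)
            · rw [if_neg (by simp [← hcv, hcolon]), if_neg (by simp [← hcv, hhash]),
                if_neg (by simp [← hcv, hbr]),
                pvWalkB_punct _ _ _ _ hcolon hhash hbr]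
              exact Or.inr ⟨p, _, rfl, rfl, h0p, hTp⟩
      · -- t is an identifier token: the loop stops
        subst htp
        simp only [pvLoopA, hj]
        rw [if_neg (by simp [pv_ne_of_pred _ _ hid (by decide : pvIdentCharB ':' = false)]),
          if_neg (by simp [pv_ne_of_pred _ _ hid (by decide : pvIdentCharB '#' = false)]),
          if_neg (by simp [pv_ne_of_pred _ _ hid (by decide : pvIdentCharB '[' = false)]),
          pvWalkB_id]
        exact Or.inr ⟨p, _, rfl, rfl, h0p, hTp⟩

-- ===== the bridge from B's staged passes to pvTokenize / pvFindPrevA =====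

-- pvTokensB with an arbitrary intermediate state, for the induction
def pvFT (cs : List Char) (ms : List Bool) (endI i : Int) (st : List PvTok × Option Int) :
    List PvTok :=
  match (PySem.List.pyRange i endI 1).foldl (pvTokStep cs ms) st with
  | (acc, some r) => acc ++ [PvTok.id r endI (PySem.List.slice cs (some r) (some endI))]
  | (acc, none) => acc

theorem pvFT_step (cs : List Char) (ms : List Bool) (endI i : Int) (hi : i < endI)
    (st : List PvTok × Option Int) :
    pvFT cs ms endI i st = pvFT cs ms endI (i + 1) (pvTokStep cs ms st i) := by
  unfold pvFT
  rw [PySem.List.pyRange_one_cons hi, List.foldl_cons]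

theorem pvFT_nil (cs : List Char) (ms : List Bool) (endI i : Int) (hi : endI ≤ i)
    (st : List PvTok × Option Int) :
    pvFT cs ms endI i st =
      (match st with
       | (acc, some r) => acc ++ [PvTok.id r endI (PySem.List.slice cs (some r) (some endI))]
       | (acc, none) => acc) := by
  unfold pvFT
  rw [PySem.List.pyRange_one_eq_nil hi, List.foldl_nil]

theorem pv_ft_key (cs : List Char) (ms : List Bool) (endI : Int) :
    ∀ n : Nat, ∀ i : Int, (endI - i).toNat ≤ n →
      (∀ acc, pvFT cs ms endI i (acc, none) = acc ++ pvTokenize cs ms endI i) ∧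
      (∀ acc r, r < i → i ≤ endI → pvCodeB ms r = true → pvIdentCharB (pvCh cs r) = true →
        (∀ m, r < m → m < i → pvCodeB ms m = true ∧ pvIdentCharB (pvCh cs m) = true) →
        pvFT cs ms endI i (acc, some r) =
          acc ++ PvTok.id r (pvRunEndB cs ms endI i)
              (PySem.List.slice cs (some r) (some (pvRunEndB cs ms endI i))) ::
            pvTokenize cs ms endI (pvRunEndB cs ms endI i)) := by
  intro n
  induction n with
  | zero =>
    intro i hn
    have hend : endI ≤ i := by omega
    constructor
    · intro acc
      rw [pvFT_nil cs ms endI i hend, pvTokenize, dif_neg (by omega)]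
      simp
    · intro acc r hri hie hc hid hinv
      have hieq : i = endI := by omega
      rw [hieq, pvFT_nil cs ms endI endI le_rfl, pvRunEndB, dif_neg (by omega), pvTokenize,
        dif_neg (by omega)]
  | succ n ih =>
    intro i hn
    by_cases hi : i < endI
    · have hstep := pvFT_step cs ms endI i hi
      obtain ⟨ihP, ihQ⟩ := ih (i + 1) (by omega)
      by_cases hc : pvCodeB ms i = true
      · by_cases hsp : PySem.Chars.isspace (pvCh cs i) = true
        · -- code whitespace: both skip; a pending run is flushed by B
          have hstv : ∀ st : List PvTok × Option Int,
              pvTokStep cs ms st i =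
                (match st.2 with
                 | some r => (st.1 ++ [PvTok.id r i (PySem.List.slice cs (some r) (some i))], none)
                 | none => st) := by
            intro st
            rw [pvTokStep]
            simp only [hc, hsp]
            rfl
          have htok : pvTokenize cs ms endI i = pvTokenize cs ms endI (i + 1) := by
            rw [pvTokenize, dif_pos hi, if_neg (by simp [hc]), if_pos hsp]
          constructor
          · intro acc
            rw [hstep, hstv]
            simp only
            rw [ihP acc, htok]
          · intro acc r hri hie hcc hidd hinv
            rw [hstep, hstv]
            simp only
            rw [ihP _]
            have hre : pvRunEndB cs ms endI i = i := by
              rw [pvRunEndB, dif_pos hi, if_neg (by simp [pv_space_not_ident _ hsp])]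
            rw [hre, htok]
            simp
        · have hsp' : PySem.Chars.isspace (pvCh cs i) = false := by simpa using hsp
          by_cases hid : pvIdentCharB (pvCh cs i) = true
          · -- identifier character: run starts or continues
            have hstv : ∀ st : List PvTok × Option Int,
                pvTokStep cs ms st i =
                  (match st.2 with
                   | none => (st.1, some i)
                   | some _ => st) := by
              intro st
              rw [pvTokStep]
              simp only [hc, hsp', hid]
              rfl
            have htok : pvTokenize cs ms endI i =
                PvTok.id i (pvRunEndB cs ms endI (i + 1))
                  (PySem.List.slice cs (some i) (some (pvRunEndB cs ms endI (i + 1)))) ::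
                pvTokenize cs ms endI (pvRunEndB cs ms endI (i + 1)) := by
              rw [pvTokenize, dif_pos hi, if_neg (by simp [hc]), if_neg hsp, if_pos hid]
            constructor
            · intro acc
              rw [hstep, hstv]
              simp only
              rw [ihQ acc i (by omega) (by omega) hc hid (by intro m h1 h2; omega), htok]
            · intro acc r hri hie hcc hidd hinv
              rw [hstep, hstv]
              simp only
              rw [ihQ acc r (by omega) (by omega) hcc hidd (by
                    intro m h1 h2
                    by_cases hm : m = i
                    · subst hm; exact ⟨hc, hid⟩
                    · exact hinv m h1 (by omega))]
              have hre : pvRunEndB cs ms endI i = pvRunEndB cs ms endI (i + 1) := by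
                rw [pvRunEndB, dif_pos hi, if_pos (by simp [hc, hid])]
              rw [hre]
          · -- significant punctuation character
            have hid' : pvIdentCharB (pvCh cs i) = false := by simpa using hid
            have hstv : ∀ st : List PvTok × Option Int,
                pvTokStep cs ms st i =
                  (match st.2 with
                   | some r =>
                     ((st.1 ++ [PvTok.id r i (PySem.List.slice cs (some r) (some i))]) ++
                       [PvTok.p i (pvCh cs i)], none)
                   | none => (st.1 ++ [PvTok.p i (pvCh cs i)], none)) := by
              intro st
              rw [pvTokStep]
              simp only [hc, hsp', hid']
              rfl
            have htok : pvTokenize cs ms endI i =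
                PvTok.p i (pvCh cs i) :: pvTokenize cs ms endI (i + 1) := by
              rw [pvTokenize, dif_pos hi, if_neg (by simp [hc]), if_neg hsp, if_neg hid]
            constructor
            · intro acc
              rw [hstep, hstv]
              simp only
              rw [ihP _, htok]
              simp
            · intro acc r hri hie hcc hidd hinv
              rw [hstep, hstv]
              simp only
              rw [ihP _]
              have hre : pvRunEndB cs ms endI i = i := by
                rw [pvRunEndB, dif_pos hi, if_neg (by simp [hid'])]
              rw [hre, htok]
              simp
      · -- non-code character: skipped; a pending run is flushed by B
        have hc' : pvCodeB ms i = false := by simpa using hc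
        have hstv : ∀ st : List PvTok × Option Int,
            pvTokStep cs ms st i =
              (match st.2 with
               | some r => (st.1 ++ [PvTok.id r i (PySem.List.slice cs (some r) (some i))], none)
               | none => st) := by
          intro st
          rw [pvTokStep]
          simp only [hc']
          rfl
        have htok : pvTokenize cs ms endI i = pvTokenize cs ms endI (i + 1) := by
          rw [pvTokenize, dif_pos hi, if_pos (by simp [hc'])]
        constructor
        · intro acc
          rw [hstep, hstv]
          simp only
          rw [ihP acc, htok]
        · intro acc r hri hie hcc hidd hinv
          rw [hstep, hstv]
          simp only
          rw [ihP _]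
          have hre : pvRunEndB cs ms endI i = i := by
            rw [pvRunEndB, dif_pos hi, if_neg (by simp [hc'])]
          rw [hre, htok]
          simp
    · -- base: the range is exhausted
      have hend : endI ≤ i := by omega
      constructor
      · intro acc
        rw [pvFT_nil cs ms endI i hend, pvTokenize, dif_neg (by omega)]
        simp
      · intro acc r hri hie hcc hidd hinv
        have hieq : i = endI := by omega
        rw [hieq, pvFT_nil cs ms endI endI le_rfl, pvRunEndB, dif_neg (by omega), pvTokenize,
          dif_neg (by omega)]

theorem pv_tok_bridge (cs : List Char) (ms : List Bool) (start endI : Int) :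
    pvTokensB cs ms start endI = pvTokenize cs ms endI start := by
  have h : pvTokensB cs ms start endI = pvFT cs ms endI start ([], none) := rfl
  rw [h, (pv_ft_key cs ms endI (endI - start).toNat start le_rfl).1 []]
  simp

theorem pv_lastSig_nat (cs : List Char) (ms : List Bool) :
    ∀ n : Nat, pvLastSigB cs ms (n : Int) =
      (if pvFindPrevA cs ms (n : Int) < 0 then none
       else some (pvCh cs (pvFindPrevA cs ms (n : Int)))) := by
  intro n
  induction n with
  | zero =>
    rw [pvLastSigB, PySem.List.pyRange_one_eq_nil (by norm_num), pvFindPrevA]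
    norm_num
  | succ n ih =>
    have hcast : ((n + 1 : Nat) : Int) = (n : Int) + 1 := by push_cast; ring
    rw [pvLastSigB, hcast,
      PySem.List.pyRange_one_succ_right (by exact_mod_cast Nat.zero_le n),
      List.foldl_append, List.foldl_cons, List.foldl_nil]
    have hprev : pvFindPrevA cs ms ((n : Int) + 1) =
        (if pvCodeB ms (n : Int) && !PySem.Chars.isspace (pvCh cs (n : Int)) then (n : Int)
         else pvFindPrevA cs ms (n : Int)) := by
      rw [pvFindPrevA, dif_pos (by omega : (0:Int) < (n:Int) + 1)]
      simp only [add_sub_cancel_right, pv_code_eq]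
      by_cases hcd : pvCodeB ms (n : Int) = true
      · by_cases hsp : PySem.Chars.isspace (pvCh cs (n : Int)) = true
        · rw [if_neg (by simp [hcd]), if_pos hsp, if_neg (by simp [hcd, hsp])]
        · rw [if_neg (by simp [hcd]), if_neg hsp,
            if_pos (by simp [hcd, Bool.eq_false_iff.mpr hsp])]
      · rw [if_pos (by simp [Bool.eq_false_iff.mpr hcd]),
          if_neg (by simp [Bool.eq_false_iff.mpr hcd])]
    by_cases hcond : (pvCodeB ms (n : Int) && !PySem.Chars.isspace (pvCh cs (n : Int))) = true
    · rw [if_pos hcond, hprev, if_pos hcond, if_neg (by omega : ¬ ((n : Int) < 0))]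
    · rw [if_neg hcond, hprev, if_neg hcond]
      exact ih

theorem pv_lastSig_eq (cs : List Char) (ms : List Bool) (p : Int) (hp : 0 ≤ p) :
    pvLastSigB cs ms p =
      (if pvFindPrevA cs ms p < 0 then none else some (pvCh cs (pvFindPrevA cs ms p))) := by
  have h := pv_lastSig_nat cs ms p.toNat
  rwa [Int.toNat_of_nonneg hp] at h

theorem pv_kw_bridge :
    ((["assign", "if", "for", "while", "case", "foreach", "return", "begin",
        "end"] : List String).map String.toList) = pvKwA := by decide

-- ===== VERDICT (by name: the statement is the Claim_ definition above) =====
theorem statement_looks_like_typed_declaration_spec : Claim_equal_statement_looks_like_typed_declaration := by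
  intro text mask stmt_start pos _
  unfold Spec_statement_looks_like_typed_declaration
  simp only [statement_looks_like_typed_declaration, statement_looks_like_typed_declaration_alt]
  set cs := text.toList with hcs
  set endI := min pos ((cs.length : Int)) with hendI
  set s0 := max 0 stmt_start with hs0
  have hE : endI ≤ (cs.length : Int) := by rw [hendI]; exact min_le_right _ _
  have h00 : (0 : Int) ≤ s0 := by rw [hs0]; exact le_max_left _ _
  rw [pv_kw_bridge, pv_tok_bridge]
  obtain ⟨sk1, sk2, sk3, sk4⟩ := pv_skip_tok cs mask endI s0
  cases ht0 : pvTokenize cs mask endI s0 with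
  | nil =>
    have hge : endI ≤ pvSkipWsA cs mask endI s0 := sk3 ht0
    have hpr := pv_parse_ge cs mask endI _ hge
    simp only [hpr]
    rw [if_pos (by norm_num)]
  | cons t0 rest =>
    obtain ⟨h0ip, h0end, h0code, h0space, h0Tp, h0case⟩ :=
      pv_tok_cons cs mask endI s0 t0 rest ht0
    obtain ⟨p0, hp0⟩ : ∃ x, pvTokPos t0 = x := ⟨_, rfl⟩
    rw [hp0] at h0ip h0end h0code h0space h0Tp h0case
    have hskq0 : pvSkipWsA cs mask endI s0 = p0 := by rw [sk4 t0 rest ht0, hp0]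
    rw [hskq0]
    rcases h0case with ⟨c0, htp0, hcv0, hcid0, h0Tnext⟩ |
      ⟨e0, str0, htp0, hid0, he0, hstr0, h0Te, hlt0, hle0⟩
    · -- first token is punctuation: both return false
      subst htp0
      have hpr := pv_parse_punct cs mask endI p0 h0end h0code (by rwa [hcv0] at hcid0)
      simp only [hpr]
      rw [if_pos (by norm_num)]
      simp [pvIsIdentB]
    · -- first token is an identifier-like run
      subst htp0
      obtain ⟨tl0, hsl0⟩ := pv_slice_head cs p0 e0 (by omega) hlt0 (by omega)
      rw [← hstr0] at hsl0
      by_cases hal0 : (PySem.Chars.isalpha (pvCh cs p0) || pvCh cs p0 == '_') = true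
      · have hpr := pv_parse_id cs mask endI p0 e0 h0end h0code hal0 he0
        simp only [hpr]
        rw [if_neg (by omega : ¬ p0 < 0)]
        have hident0 : pvIsIdentB (PvTok.id p0 e0 str0) = true := by
          rw [hsl0]; simp only [pvIsIdentB]; exact hal0
        rw [if_neg (show ¬(¬ pvIsIdentB (PvTok.id p0 e0 str0) = true) by simp [hident0])]
        simp only [pvTokStr, ← hstr0]
        by_cases hkw : pvKwA.contains (PySem.Chars.lower str0) = true
        · rw [if_pos hkw]
          try rw [if_pos hkw]
        · rw [if_neg hkw]
          try rw [if_neg hkw]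
          have hrel := pv_loop_walk cs mask endI hE (cs.length + 1)
            ((PvTok.id p0 e0 str0 :: rest).length + 1) e0 rest
            (by omega) h0Te (by omega) (by simp)
          rcases hrel with ⟨ha, hb⟩ | ⟨j, ts2, ha, hb, hj0, hTj⟩
          · rw [ha, hb]
          · simp only [ha, hb]
            obtain ⟨skj1, skj2, skj3, skj4⟩ := pv_skip_tok cs mask endI j
            cases htv2 : ts2 with
            | nil =>
              rw [htv2] at hTj
              have hgej : endI ≤ pvSkipWsA cs mask endI j := skj3 hTj
              have hpr2 := pv_parse_ge cs mask endI _ hgej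
              simp only [hpr2]
              rw [if_pos (by norm_num)]
            | cons t1 ts1 =>
              rw [htv2] at hTj
              obtain ⟨h1ip, h1end, h1code, h1space, h1Tp, h1case⟩ :=
                pv_tok_cons cs mask endI j t1 ts1 hTj
              obtain ⟨p1, hp1⟩ : ∃ x, pvTokPos t1 = x := ⟨_, rfl⟩
              rw [hp1] at h1ip h1end h1code h1space h1Tp h1case
              have hskq1 : pvSkipWsA cs mask endI j = p1 := by rw [skj4 t1 ts1 hTj, hp1]
              rw [hskq1]
              rcases h1case with ⟨c1, htp1, hcv1, hcid1, h1Tnext⟩ |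
                ⟨e1, str1, htp1, hid1, he1, hstr1, h1Te, hlt1, hle1⟩
              · subst htp1
                have hpr2 := pv_parse_punct cs mask endI p1 h1end h1code
                  (by rwa [hcv1] at hcid1)
                simp only [hpr2]
                rw [if_pos (by norm_num)]
                simp [pvIsIdentB]
              · subst htp1
                obtain ⟨tl1, hsl1⟩ := pv_slice_head cs p1 e1 (by omega) hlt1 (by omega)
                rw [← hstr1] at hsl1
                by_cases hal1 : (PySem.Chars.isalpha (pvCh cs p1) || pvCh cs p1 == '_') = true
                · have hpr2 := pv_parse_id cs mask endI p1 e1 h1end h1code hal1 he1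
                  simp only [hpr2]
                  rw [if_neg (by omega : ¬ p1 < 0)]
                  have hident1 : pvIsIdentB (PvTok.id p1 e1 str1) = true := by
                    rw [hsl1]; simp only [pvIsIdentB]; exact hal1
                  rw [if_neg (show ¬(¬ pvIsIdentB (PvTok.id p1 e1 str1) = true) by
                    simp [hident1])]
                  simp only [pvTokPos]
                  rw [pv_lastSig_eq cs mask p1 (by omega)]
                  by_cases hneg : pvFindPrevA cs mask p1 < 0
                  · rw [if_pos hneg, if_neg (by simp; omega)]
                  · rw [if_neg hneg]
                    simp only
                    rw [show (decide (0 ≤ pvFindPrevA cs mask p1)) = true by simp; omega,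
                      Bool.true_and]
                    cases hdot : (pvCh cs (pvFindPrevA cs mask p1) == '.') <;> simp
                · have hpr2 := pv_parse_noalpha cs mask endI p1 h1end (by simpa using hal1)
                  simp only [hpr2]
                  rw [if_pos (by norm_num)]
                  have hident1 : pvIsIdentB (PvTok.id p1 e1 str1) = false := by
                    rw [hsl1]; simp only [pvIsIdentB]; simpa using hal1
                  rw [if_pos (show (¬ pvIsIdentB (PvTok.id p1 e1 str1) = true) by
                    simp [hident1])]
      · have hpr := pv_parse_noalpha cs mask endI p0 h0end (by simpa using hal0)
        simp only [hpr]
        rw [if_pos (by norm_num)]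
        have hident0 : pvIsIdentB (PvTok.id p0 e0 str0) = false := by
          rw [hsl0]; simp only [pvIsIdentB]; simpa using hal0
        rw [if_pos (show (¬ pvIsIdentB (PvTok.id p0 e0 str0) = true) by simp [hident0])]
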